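-- pv_equiv track=rewrite | github.com/khaHesham/PS | code360/companies most asked problems/smallest with k distinct.py | smallestSubarrayWithKDistinct
-- ===== SOURCE A (Python) =====
-- from typing import List
-- from collections import defaultdict
--
-- def smallestSubarrayWithKDistinct(arr: List[int], k: int) -> List[int]:
--     n = len(arr)
--     if k > n or n == 0:
--         return [-1]
--
--     num_count = defaultdict(int)
--     left = 0
--     min_length = float('inf')
--     min_left = 0
--     min_right = 0
--     curr_unique_count = 0
--
--     for right in range(n):
--         if num_count[arr[right]] == 0:
--             curr_unique_count += 1
--         num_count[arr[right]] += 1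
--
--         while curr_unique_count == k:
--             if right - left + 1 < min_length:
--                 min_length = right - left + 1
--                 min_left = left
--                 min_right = right
--
--             num_count[arr[left]] -= 1
--             if num_count[arr[left]] == 0:
--                 curr_unique_count -= 1
--             left += 1
--
--     return [min_left, min_right] if min_length != float('inf') else [-1]
-- ===== SOURCE B (Python) =====
-- from typing import List
--
-- def smallestSubarrayWithKDistinct(arr: List[int], k: int) -> List[int]:
--     n = len(arr)
--     if k > n or n == 0:
--         return [-1]
--     best = None  # (length, left, right)
--     for r in range(n):
--         cand = None
--         seen = set()
--         for i, x in enumerate(reversed(arr[:r + 1])):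
--             seen.add(x)
--             if len(seen) == k:
--                 cand = (i + 1, r - i, r)
--                 break
--         if cand is not None and (best is None or cand[0] < best[0]):
--             best = cand
--     return [best[1], best[2]] if best is not None else [-1]
-- ===== Notes on version B (the rewrite author's own statement) =====
-- stated objective: alternative
-- what changed: Replaces the single-pass sliding window with persistent left pointer and running count dict by an independent brute-force backward scan per right endpoint: for each right, a fresh set is grown leftwards until it holds exactly k distinct values, and the global minimum is kept with a strict comparison to preserve A's earliest-right tie-break.
import Mathlib
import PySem

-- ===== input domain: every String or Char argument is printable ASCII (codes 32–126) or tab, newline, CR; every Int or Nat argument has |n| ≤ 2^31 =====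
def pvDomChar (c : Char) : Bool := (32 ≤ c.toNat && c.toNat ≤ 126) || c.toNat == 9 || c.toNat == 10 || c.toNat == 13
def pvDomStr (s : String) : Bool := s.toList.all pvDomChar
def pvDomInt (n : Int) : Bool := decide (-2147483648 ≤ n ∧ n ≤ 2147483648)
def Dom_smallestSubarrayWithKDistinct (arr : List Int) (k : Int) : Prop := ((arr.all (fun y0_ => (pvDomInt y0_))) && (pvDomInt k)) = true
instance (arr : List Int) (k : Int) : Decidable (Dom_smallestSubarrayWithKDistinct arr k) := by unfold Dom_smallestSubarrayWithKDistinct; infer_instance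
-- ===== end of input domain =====

-- B replaces A's sliding window by an independent brute-force backward scan per right
-- endpoint (same results, different algorithm; B is not faster).

-- ===== PORT A =====
-- Python's float('inf') sentinel for min_length is modelled as Option Int (none = inf):
-- it is only ever compared with ints, overwritten by ints, and finally tested against inf.
def pvLtInf (a : Int) (m : Option Int) : Bool :=
  match m with
  | none => true
  | some v => a < v

-- the inner `while curr_unique_count == k` loop; fuel bounds the iterations
-- (the loop runs at most window-size many times, the caller passes enough fuel)
def pvWhileA (arr : List Int) (k : Int) (right : Int) :
    Nat → PySem.Dict Int Int → Int → Int → Option Int → Int → Int →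
      PySem.Dict Int Int × Int × Int × Option Int × Int × Int
  | 0, d, left, curr, ml, mL, mR => (d, left, curr, ml, mL, mR)
  | fuel + 1, d, left, curr, ml, mL, mR =>
    if curr = k then
      let st :=
        if pvLtInf (right - left + 1) ml then (some (right - left + 1), left, right)
        else (ml, mL, mR)
      let x := (PySem.List.pyGet? arr left).getD 0
      let c := d.getD x 0 - 1
      let d' := d.insert x c
      let curr' := if c = 0 then curr - 1 else curr
      pvWhileA arr k right fuel d' (left + 1) curr' st.1 st.2.1 st.2.2
    else (d, left, curr, ml, mL, mR)

-- one iteration of `for right in range(n)`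
def pvStepA (arr : List Int) (k : Int)
    (st : PySem.Dict Int Int × Int × Int × Option Int × Int × Int) (right : Int) :
    PySem.Dict Int Int × Int × Int × Option Int × Int × Int :=
  match st with
  | (d, left, curr, ml, mL, mR) =>
    let x := (PySem.List.pyGet? arr right).getD 0
    let c0 := d.getD x 0
    let curr' := if c0 = 0 then curr + 1 else curr
    let d' := d.insert x (c0 + 1)
    pvWhileA arr k right ((right - left + 1).toNat + 1) d' left curr' ml mL mR

def smallestSubarrayWithKDistinct (arr : List Int) (k : Int) : List Int :=
  let n : Int := (arr.length : Int)
  if k > n ∨ n = 0 then [-1]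
  else
    match (PySem.List.pyRange 0 n 1).foldl (pvStepA arr k) (PySem.Dict.empty, 0, 0, none, 0, 0) with
    | (_, _, _, ml, mL, mR) => if ml ≠ none then [mL, mR] else [-1]

-- ===== PORT B =====
-- inner scan: walk the reversed prefix arr[:r+1] (i = offset from r), growing a set,
-- and return the first (shortest) window ending at r with exactly k distinct values
def pvScanB (k : Int) (r : Int) : List Int → Int → PySem.Set Int → Option (Int × Int × Int)
  | [], _, _ => none
  | x :: rest, i, seen =>
    let seen' := PySem.Set.add seen x
    if (seen'.length : Int) = k then some (i + 1, r - i, r)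
    else pvScanB k r rest (i + 1) seen'

def pvStepB (arr : List Int) (k : Int) (best : Option (Int × Int × Int)) (r : Int) :
    Option (Int × Int × Int) :=
  match pvScanB k r (PySem.List.slice arr none (some (r + 1))).reverse 0 PySem.Set.empty with
  | none => best
  | some c =>
    match best with
    | none => some c
    | some b => if c.1 < b.1 then some c else best

def smallestSubarrayWithKDistinct_alt (arr : List Int) (k : Int) : List Int :=
  let n : Int := (arr.length : Int)
  if k > n ∨ n = 0 then [-1]
  else
    match (PySem.List.pyRange 0 n 1).foldl (pvStepB arr k) none with
    | none => [-1]
    | some b => [b.2.1, b.2.2]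

-- ===== PRECONDITION & SPEC =====
def Spec_smallestSubarrayWithKDistinct (arr : List Int) (k : Int) (out : List Int) : Prop := out = smallestSubarrayWithKDistinct_alt arr k
instance (arr : List Int) (k : Int) (out : List Int) : Decidable (Spec_smallestSubarrayWithKDistinct arr k out) := by unfold Spec_smallestSubarrayWithKDistinct; infer_instance

-- ===== CLAIM (what is proved, stated in full; the proofs are below) =====
def Claim_equal_smallestSubarrayWithKDistinct : Prop := ∀ (arr : List Int) (k : Int), Dom_smallestSubarrayWithKDistinct arr k → Spec_smallestSubarrayWithKDistinct arr k (smallestSubarrayWithKDistinct arr k)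

-- ===== LEMMAS AND PROOFS =====

-- window of indices [l, R) and its number of distinct values
def pvWin (arr : List Int) (l R : Nat) : List Int := (arr.take R).drop l
def pvDC (arr : List Int) (l R : Nat) : Nat := (pvWin arr l R).toFinset.card

-- largest l ≤ start with exactly k distinct values in [l, R), found by descending search
def pvFindL (arr : List Int) (k : Int) (R : Nat) : Nat → Option Nat
  | 0 => if (pvDC arr 0 R : Int) = k then some 0 else none
  | l + 1 => if (pvDC arr (l + 1) R : Int) = k then some (l + 1) else pvFindL arr k R l

def pvCand (arr : List Int) (k : Int) (r : Nat) : Option Nat := pvFindL arr k (r + 1) r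

-- the min-tracking update A performs for a candidate window [l, r]
def pvUpd (st : Option Int × Int × Int) (r : Nat) : Option Nat → Option Int × Int × Int
  | none => st
  | some l => if pvLtInf ((r : Int) + 1 - l) st.1 then (some ((r : Int) + 1 - l), (l : Int), (r : Int)) else st

def pvBest (arr : List Int) (k : Int) (R : Nat) : Option Int × Int × Int :=
  (List.range R).foldl (fun st r => pvUpd st r (pvCand arr k r)) (none, 0, 0)

-- A's loop invariant after processing the first R elements
def pvInvA (arr : List Int) (k : Int) (R : Nat)
    (st : PySem.Dict Int Int × Int × Int × Option Int × Int × Int) : Prop :=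
  match st with
  | (d, left, curr, ml, mL, mR) =>
    ∃ lN : Nat, lN ≤ R ∧
      left = (lN : Int) ∧
      (∀ x : Int, d.getD x 0 = ((pvWin arr lN R).count x : Int)) ∧
      curr = (pvDC arr lN R : Int) ∧
      (pvDC arr lN R : Int) < k ∧
      (0 < lN → k ≤ (pvDC arr (lN - 1) R : Int)) ∧
      (ml, mL, mR) = pvBest arr k R ∧
      (0 < lN → ∃ m : Int, ml = some m ∧ m ≤ (R : Int) + 1 - lN)

-- relation between A's (min_length, min_left, min_right) triple and B's best
def pvRel (st : Option Int × Int × Int) (b : Option (Int × Int × Int)) : Prop :=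
  (st.1 = none ∧ b = none) ∨ (∃ m, st.1 = some m ∧ b = some (m, st.2.1, st.2.2))

-- basic window lemmas
lemma pvWin_eq_nil (arr : List Int) {l R : Nat} (h : R ≤ l) : pvWin arr l R = [] := by
  unfold pvWin
  apply List.drop_eq_nil_of_le
  simp [List.length_take]
  omega

lemma pvWin_cons (arr : List Int) {l R : Nat} (hl : l < R) (hn : l < arr.length) :
    pvWin arr l R = arr[l] :: pvWin arr (l + 1) R := by
  unfold pvWin
  rw [List.drop_eq_getElem_cons (by simp [List.length_take]; omega)]
  simp [List.getElem_take]

lemma pvWin_append (arr : List Int) {l r : Nat} (hl : l ≤ r) (hr : r < arr.length) :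
    pvWin arr l (r + 1) = pvWin arr l r ++ [arr[r]] := by
  unfold pvWin
  rw [List.take_add_one, List.getElem?_eq_getElem hr]
  rw [List.drop_append_of_le_length (by simp; omega)]
  simp

lemma pvDC_anti (arr : List Int) {l l' : Nat} (h : l ≤ l') (R : Nat) :
    pvDC arr l' R ≤ pvDC arr l R := by
  unfold pvDC
  apply Finset.card_le_card
  intro x hx
  simp only [List.mem_toFinset] at *
  have : pvWin arr l' R = (pvWin arr l R).drop (l' - l) := by
    unfold pvWin; rw [List.drop_drop]; congr 1; omega
  rw [this] at hx
  exact List.mem_of_mem_drop hx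

lemma pvDC_cons (arr : List Int) {l R : Nat} (hl : l < R) (hn : l < arr.length) :
    pvDC arr l R = pvDC arr (l + 1) R + (if arr[l] ∈ pvWin arr (l + 1) R then 0 else 1) := by
  unfold pvDC
  rw [pvWin_cons arr hl hn, List.toFinset_cons]
  by_cases h : arr[l] ∈ pvWin arr (l + 1) R
  · rw [Finset.card_insert_of_mem (by simpa [List.mem_toFinset] using h)]
    simp [h]
  · rw [Finset.card_insert_of_notMem (by simpa [List.mem_toFinset] using h)]
    simp [h]

lemma pvDC_append (arr : List Int) {l r : Nat} (hl : l ≤ r) (hr : r < arr.length) :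
    pvDC arr l (r + 1) = pvDC arr l r + (if arr[r] ∈ pvWin arr l r then 0 else 1) := by
  unfold pvDC
  rw [pvWin_append arr hl hr, List.toFinset_append]
  rw [show ([arr[r]] : List Int).toFinset = {arr[r]} from rfl, Finset.union_singleton]
  by_cases h : arr[r] ∈ pvWin arr l r
  · rw [Finset.card_insert_of_mem (by simpa [List.mem_toFinset] using h)]
    simp [h]
  · rw [Finset.card_insert_of_notMem (by simpa [List.mem_toFinset] using h)]
    simp [h]

lemma pvDC_mono_R (arr : List Int) {l r : Nat} (hl : l ≤ r) (hr : r < arr.length) :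
    pvDC arr l r ≤ pvDC arr l (r + 1) := by
  rw [pvDC_append arr hl hr]
  split <;> omega

-- pvFindL characterizations
lemma pvFindL_some_of_max (arr : List Int) (k : Int) (R : Nat) {l0 : Nat} :
    ∀ start, l0 ≤ start → (pvDC arr l0 R : Int) = k →
      (∀ l, l0 < l → l ≤ start → (pvDC arr l R : Int) ≠ k) →
      pvFindL arr k R start = some l0 := by
  intro start
  induction start with
  | zero =>
    intro h0 hk _
    interval_cases l0
    simp [pvFindL, hk]
  | succ s ih =>
    intro h0 hk hmax
    by_cases he : l0 = s + 1
    · subst he; simp [pvFindL, hk]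
    · have hne : (pvDC arr (s + 1) R : Int) ≠ k := hmax (s + 1) (by omega) (by omega)
      simp only [pvFindL, if_neg hne]
      exact ih (by omega) hk (fun l h1 h2 => hmax l h1 (by omega))

lemma pvFindL_none_of (arr : List Int) (k : Int) (R : Nat) :
    ∀ start, (∀ l, l ≤ start → (pvDC arr l R : Int) ≠ k) →
      pvFindL arr k R start = none := by
  intro start
  induction start with
  | zero => intro h; simp [pvFindL, h 0 (by omega)]
  | succ s ih =>
    intro h
    simp only [pvFindL, if_neg (h (s + 1) (by omega))]
    exact ih (fun l hl => h l (by omega))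

lemma pvFindL_ge (arr : List Int) (k : Int) (R : Nat) {l0 : Nat} :
    ∀ start, l0 ≤ start → (pvDC arr l0 R : Int) = k →
      ∃ l', pvFindL arr k R start = some l' ∧ l0 ≤ l' := by
  intro start
  induction start with
  | zero =>
    intro h0 hk
    interval_cases l0
    exact ⟨0, by simp [pvFindL, hk], le_refl 0⟩
  | succ s ih =>
    intro h0 hk
    by_cases he : (pvDC arr (s + 1) R : Int) = k
    · exact ⟨s + 1, by simp [pvFindL, he], by omega⟩
    · have hl0 : l0 ≤ s := by
        rcases Nat.lt_or_ge l0 (s + 1) with h | h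
        · omega
        · exfalso; exact he (by rw [show s + 1 = l0 by omega]; exact hk)
      obtain ⟨l', h1, h2⟩ := ih hl0 hk
      exact ⟨l', by simp [pvFindL, if_neg he, h1], h2⟩

-- absorbing a longer candidate update before a shorter one
lemma pvUpd_absorb (ml : Option Int) (mL mR : Int) (r lN l' : Nat) (h : lN ≤ l') :
    pvUpd (if pvLtInf ((r : Int) + 1 - lN) ml then (some ((r : Int) + 1 - lN), (lN : Int), (r : Int)) else (ml, mL, mR)) r (some l')
      = pvUpd (ml, mL, mR) r (some l') := by
  have hc : (lN : Int) ≤ (l' : Int) := by exact_mod_cast h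
  rcases Nat.eq_or_lt_of_le h with he | hlt
  · subst he
    cases ml with
    | none =>
      rw [if_pos (by simp [pvLtInf])]
      simp [pvUpd, pvLtInf]
    | some m =>
      by_cases h1 : (r : Int) + 1 - lN < m
      · rw [if_pos (by simp [pvLtInf, h1])]
        simp [pvUpd, pvLtInf, h1]
      · rw [if_neg (by simp [pvLtInf, h1])]
  · have hc2 : ((r : Int) + 1 - l') < ((r : Int) + 1 - lN) := by
      have h3 : (lN : Int) < (l' : Int) := by exact_mod_cast hlt
      omega
    cases ml with
    | none =>
      rw [if_pos (by simp [pvLtInf])]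
      simp [pvUpd, pvLtInf, hc2]
    | some m =>
      by_cases h1 : (r : Int) + 1 - lN < m
      · rw [if_pos (by simp [pvLtInf, h1])]
        have h4 : (r : Int) + 1 - l' < m := lt_trans hc2 h1
        simp [pvUpd, pvLtInf, hc2, h4]
      · rw [if_neg (by simp [pvLtInf, h1])]

-- the inner while loop meets its specification
lemma pvWhileA_spec (arr : List Int) (k : Int) (r : Nat) (hr : r < arr.length) (hk : 1 ≤ k) :
    ∀ fuel (lN : Nat) (d : PySem.Dict Int Int) (ml : Option Int) (mL mR : Int),
      lN ≤ r + 1 →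
      (∀ x : Int, d.getD x 0 = ((pvWin arr lN (r + 1)).count x : Int)) →
      (pvDC arr lN (r + 1) : Int) ≤ k →
      (0 < lN → k ≤ (pvDC arr (lN - 1) (r + 1) : Int)) →
      (0 < lN → ∃ m : Int, ml = some m ∧ m ≤ (r : Int) + 2 - lN) →
      r + 1 - lN < fuel →
      ∃ (lN' : Nat) (d' : PySem.Dict Int Int),
        lN ≤ lN' ∧ lN' ≤ r + 1 ∧
        pvWhileA arr k (r : Int) fuel d (lN : Int) ((pvDC arr lN (r + 1) : Int)) ml mL mR
          = (d', (lN' : Int), (pvDC arr lN' (r + 1) : Int),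
             (pvUpd (ml, mL, mR) r (pvCand arr k r)).1,
             (pvUpd (ml, mL, mR) r (pvCand arr k r)).2.1,
             (pvUpd (ml, mL, mR) r (pvCand arr k r)).2.2) ∧
        (∀ x : Int, d'.getD x 0 = ((pvWin arr lN' (r + 1)).count x : Int)) ∧
        (pvDC arr lN' (r + 1) : Int) < k ∧
        (0 < lN' → k ≤ (pvDC arr (lN' - 1) (r + 1) : Int)) ∧
        (0 < lN' → ∃ m : Int, (pvUpd (ml, mL, mR) r (pvCand arr k r)).1 = some m ∧
          m ≤ (r : Int) + 2 - lN') := by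
  intro fuel
  induction fuel with
  | zero =>
    intro lN d ml mL mR h1 _ _ _ _ h6
    omega
  | succ fuel ih =>
    intro lN d ml mL mR hlle hcnt hle htight hml hfuel
    by_cases hcur : ((pvDC arr lN (r + 1) : Int)) = k
    · -- loop body runs
      have hlr : lN ≤ r := by
        by_contra hx
        have he : lN = r + 1 := by omega
        rw [he] at hcur
        have hz : pvDC arr (r + 1) (r + 1) = 0 := by
          unfold pvDC
          rw [pvWin_eq_nil arr (le_refl _)]
          simp
        rw [hz] at hcur
        simp at hcur
        omega
      have hln : lN < arr.length := lt_of_le_of_lt hlr hr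
      have hwin : pvWin arr lN (r + 1) = arr[lN] :: pvWin arr (lN + 1) (r + 1) :=
        pvWin_cons arr (by omega) hln
      have hxget : (PySem.List.pyGet? arr ((lN : Nat) : Int)).getD 0 = arr[lN] := by
        simp [pysem, List.getElem?_eq_getElem hln]
      have hcx : d.getD arr[lN] 0 = ((pvWin arr (lN + 1) (r + 1)).count arr[lN] : Int) + 1 := by
        rw [hcnt, hwin]
        simp [List.count_cons_self]
      set st : Option Int × Int × Int :=
        if pvLtInf ((r : Int) - (lN : Int) + 1) ml then (some ((r : Int) - (lN : Int) + 1), (lN : Int), (r : Int)) else (ml, mL, mR) with hst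
      have hcnt' : ∀ y : Int, (d.insert arr[lN] (d.getD arr[lN] 0 - 1)).getD y 0
          = ((pvWin arr (lN + 1) (r + 1)).count y : Int) := by
        intro y
        rw [PySem.Dict.getD_insert]
        by_cases hy : y = arr[lN]
        · rw [if_pos hy, hy, hcx]; ring
        · rw [if_neg hy, hcnt, hwin]
          have hy2 : ¬arr[lN] = y := fun hc => hy hc.symm
          push_cast [List.count_cons]
          simp [hy2]
      have hdc' : (if d.getD arr[lN] 0 - 1 = 0 then (pvDC arr lN (r + 1) : Int) - 1 else (pvDC arr lN (r + 1) : Int))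
          = (pvDC arr (lN + 1) (r + 1) : Int) := by
        rw [pvDC_cons arr (by omega) hln, hcx]
        by_cases hmem : arr[lN] ∈ pvWin arr (lN + 1) (r + 1)
        · have hcz : (pvWin arr (lN + 1) (r + 1)).count arr[lN] ≠ 0 := by
            simp [List.count_eq_zero]
            exact hmem
          rw [if_neg (by omega), if_pos hmem]
          push_cast
          omega
        · have hcz : (pvWin arr (lN + 1) (r + 1)).count arr[lN] = 0 := by
            simp [List.count_eq_zero, hmem]
          rw [hcz, if_pos (by omega), if_neg hmem]
          push_cast
          omega
      obtain ⟨lc, hlc, hlclN⟩ := pvFindL_ge arr k (r + 1) r hlr hcur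
      have hcand : pvCand arr k r = some lc := hlc
      have habs : pvUpd st r (some lc) = pvUpd (ml, mL, mR) r (some lc) := by
        have h0 := pvUpd_absorb ml mL mR r lN lc hlclN
        rw [show ((r : Int) + 1 - (lN : Int)) = ((r : Int) - (lN : Int) + 1) from by ring] at h0
        rw [hst]
        exact h0
      have hml' : 0 < lN + 1 → ∃ m : Int, st.1 = some m ∧ m ≤ (r : Int) + 2 - ((lN + 1 : Nat) : Int) := by
        intro _
        rw [hst]
        by_cases hb : pvLtInf ((r : Int) - (lN : Int) + 1) ml = true
        · rw [if_pos hb]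
          exact ⟨(r : Int) - (lN : Int) + 1, rfl, by push_cast; omega⟩
        · rw [if_neg hb]
          cases ml with
          | none => simp [pvLtInf] at hb
          | some m =>
            refine ⟨m, rfl, ?_⟩
            simp [pvLtInf] at hb
            push_cast
            omega
      obtain ⟨lN', d', hge', hle', heq', hcnt'', hdclt', htight', hmlb'⟩ :=
        ih (lN + 1) (d.insert arr[lN] (d.getD arr[lN] 0 - 1)) st.1 st.2.1 st.2.2
          (by omega) hcnt'
          (by
            have hmono := pvDC_anti arr (l := lN) (l' := lN + 1) (by omega) (r + 1)
            have hmc : ((pvDC arr (lN + 1) (r + 1) : Nat) : Int) ≤ ((pvDC arr lN (r + 1) : Nat) : Int) := by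
              exact_mod_cast hmono
            omega)
          (by intro _; simp only [Nat.add_sub_cancel]; rw [hcur])
          hml' (by omega)
      have hsteta : (st.1, st.2.1, st.2.2) = st := rfl
      rw [hsteta, hcand, habs] at heq' hmlb'
      refine ⟨lN', d', by omega, hle', ?_, hcnt'', hdclt', htight', by rw [hcand]; exact hmlb'⟩
      have hcast : (lN : Int) + 1 = ((lN + 1 : Nat) : Int) := by push_cast; ring
      simp only [pvWhileA, if_pos hcur]
      rw [hxget, hdc', hcast, ← hst]
      rw [hcand]
      exact heq'
    · -- loop exits immediately
      have hdclt : (pvDC arr lN (r + 1) : Int) < k := lt_of_le_of_ne hle hcur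
      have hupd : pvUpd (ml, mL, mR) r (pvCand arr k r) = (ml, mL, mR) := by
        by_cases hz : lN = 0
        · have hnone : pvCand arr k r = none := by
            apply pvFindL_none_of
            intro l _
            have hmono : pvDC arr l (r + 1) ≤ pvDC arr lN (r + 1) := pvDC_anti arr (by omega) (r + 1)
            have hlt : (pvDC arr l (r + 1) : Int) < k := by
              calc (pvDC arr l (r + 1) : Int) ≤ (pvDC arr lN (r + 1) : Int) := by exact_mod_cast hmono
                _ < k := hdclt
            omega
          rw [hnone]
          rfl
        · have hpos : 0 < lN := Nat.pos_of_ne_zero hz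
          have hln1 : lN - 1 < arr.length := by omega
          have hdcm : pvDC arr (lN - 1) (r + 1) ≤ pvDC arr (lN - 1 + 1) (r + 1) + 1 := by
            rw [pvDC_cons arr (by omega) hln1]
            split <;> omega
          have heqk : (pvDC arr (lN - 1) (r + 1) : Int) = k := by
            have h1 := htight hpos
            have h2 : lN - 1 + 1 = lN := by omega
            rw [h2] at hdcm
            have h3 : (pvDC arr (lN - 1) (r + 1) : Int) ≤ (pvDC arr lN (r + 1) : Int) + 1 := by
              exact_mod_cast hdcm
            omega
          have hsome : pvCand arr k r = some (lN - 1) := by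
            apply pvFindL_some_of_max arr k (r + 1) r (by omega) heqk
            intro l hl1 hl2
            have hmono : pvDC arr l (r + 1) ≤ pvDC arr lN (r + 1) := pvDC_anti arr (by omega) (r + 1)
            have hlt : (pvDC arr l (r + 1) : Int) < k := by
              calc (pvDC arr l (r + 1) : Int) ≤ (pvDC arr lN (r + 1) : Int) := by exact_mod_cast hmono
                _ < k := hdclt
            omega
          obtain ⟨m, hm1, hm2⟩ := hml hpos
          rw [hsome, hm1]
          simp only [pvUpd, pvLtInf]
          rw [if_neg]
          simp only [decide_eq_true_eq]
          push_cast [Nat.cast_sub (by omega : 1 ≤ lN)]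
          omega
      refine ⟨lN, d, le_refl _, hlle, ?_, hcnt, hdclt, htight, ?_⟩
      · simp only [pvWhileA, if_neg hcur]
        rw [hupd]
      · intro hpos
        rw [hupd]
        exact hml hpos

lemma pvBest_succ (arr : List Int) (k : Int) (R : Nat) :
    pvBest arr k (R + 1) = pvUpd (pvBest arr k R) R (pvCand arr k R) := by
  unfold pvBest
  rw [List.range_succ, List.foldl_append]
  rfl

-- one outer step of A preserves the invariant
lemma pvStepA_inv (arr : List Int) (k : Int) (hk : 1 ≤ k) {R : Nat} (hR : R < arr.length)
    (st : PySem.Dict Int Int × Int × Int × Option Int × Int × Int)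
    (h : pvInvA arr k R st) :
    pvInvA arr k (R + 1) (pvStepA arr k st (R : Int)) := by
  obtain ⟨d, left, curr, ml, mL, mR⟩ := st
  obtain ⟨lN, hlle, hleft, hcnt, hcurr, hlt, htight, hbest, hmlb⟩ := h
  have hxget : (PySem.List.pyGet? arr ((R : Nat) : Int)).getD 0 = arr[R] := by
    simp [pysem, List.getElem?_eq_getElem hR]
  have hwin : pvWin arr lN (R + 1) = pvWin arr lN R ++ [arr[R]] := pvWin_append arr hlle hR
  have hcnt' : ∀ y : Int, (d.insert arr[R] (d.getD arr[R] 0 + 1)).getD y 0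
      = ((pvWin arr lN (R + 1)).count y : Int) := by
    intro y
    rw [PySem.Dict.getD_insert, hwin]
    push_cast [List.count_append, List.count_singleton']
    by_cases hy : y = arr[R]
    · simp [hy, hcnt]
    · have hy2 : ¬arr[R] = y := fun hc => hy hc.symm
      simp [hy, hy2, hcnt]
  have hdcapp := pvDC_append arr hlle hR
  have hcurr' : (if d.getD arr[R] 0 = 0 then curr + 1 else curr) = (pvDC arr lN (R + 1) : Int) := by
    rw [hcnt arr[R], hcurr, hdcapp]
    by_cases hmem : arr[R] ∈ pvWin arr lN R
    · have hcz : (pvWin arr lN R).count arr[R] ≠ 0 := by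
        simp [List.count_eq_zero]; exact hmem
      rw [if_neg (by omega), if_pos hmem]
      push_cast; omega
    · have hcz : (pvWin arr lN R).count arr[R] = 0 := by
        simp [List.count_eq_zero, hmem]
      rw [hcz, if_pos (by omega), if_neg hmem]
      push_cast; omega
  have hfuel : ((R : Int) - (lN : Int) + 1).toNat + 1 > R + 1 - lN := by omega
  obtain ⟨lN', d', hge', hle', heq', hcnt'', hdclt', htight', hmlb'⟩ :=
    pvWhileA_spec arr k R hR hk (((R : Int) - (lN : Int) + 1).toNat + 1) lN
      (d.insert arr[R] (d.getD arr[R] 0 + 1)) ml mL mR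
      (by omega) hcnt'
      (by rw [hdcapp]; split at hdcapp <;> push_cast <;> omega)
      (by
        intro hpos
        have h1 := htight hpos
        have h2 := pvDC_mono_R arr (l := lN - 1) (r := R) (by omega) hR
        have h3 : ((pvDC arr (lN - 1) R : Nat) : Int) ≤ ((pvDC arr (lN - 1) (R + 1) : Nat) : Int) := by
          exact_mod_cast h2
        omega)
      (by
        intro hpos
        obtain ⟨m, hm1, hm2⟩ := hmlb hpos
        exact ⟨m, hm1, by omega⟩)
      (by omega)
  show pvInvA arr k (R + 1) (pvStepA arr k (d, left, curr, ml, mL, mR) (R : Int))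
  unfold pvStepA
  simp only
  rw [hxget, hcurr', hleft, heq']
  exact ⟨lN', by omega, rfl, hcnt'', rfl, hdclt', htight',
    by rw [pvBest_succ, ← hbest], by
      intro hpos
      obtain ⟨m, hm1, hm2⟩ := hmlb' hpos
      exact ⟨m, hm1, by push_cast; omega⟩⟩

lemma pvFoldA (arr : List Int) (k : Int) (hk : 1 ≤ k) :
    ∀ R : Nat, R ≤ arr.length →
      pvInvA arr k R ((PySem.List.pyRange 0 (R : Int) 1).foldl (pvStepA arr k)
        (PySem.Dict.empty, 0, 0, none, 0, 0)) := by
  intro R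
  induction R with
  | zero =>
    intro _
    rw [show ((0 : Nat) : Int) = 0 from rfl, PySem.List.pyRange_one_eq_nil (by omega)]
    refine ⟨0, by omega, rfl, ?_, ?_, ?_, by omega, rfl, by omega⟩
    · intro x
      rw [pvWin_eq_nil arr (le_refl 0)]
      simp [PySem.Dict.getD_empty]
    · unfold pvDC
      rw [pvWin_eq_nil arr (le_refl 0)]
      simp
    · unfold pvDC
      rw [pvWin_eq_nil arr (le_refl 0)]
      simp; omega
  | succ R ih =>
    intro hR
    have hsplit : PySem.List.pyRange 0 (((R + 1 : Nat)) : Int) 1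
        = PySem.List.pyRange 0 ((R : Nat) : Int) 1 ++ [((R : Nat) : Int)] := by
      push_cast
      exact PySem.List.pyRange_one_succ_right (by omega)
    rw [hsplit, List.foldl_append]
    simp only [List.foldl]
    exact pvStepA_inv arr k hk (by omega) _ (ih (by omega))

lemma pvSetLen (s t : List Int) (hnd : s.Nodup) (hmem : ∀ x, x ∈ s ↔ x ∈ t) :
    s.length = t.toFinset.card := by
  rw [← List.toFinset_card_of_nodup hnd]
  congr 1
  ext x
  simp [List.mem_toFinset, hmem x]

lemma pvScan_step (arr : List Int) (r l : Nat) (hl : l ≤ r) (hr : r < arr.length)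
    (s : PySem.Set Int) (hnd : s.Nodup) (hmem : ∀ x, x ∈ s ↔ x ∈ pvWin arr (l + 1) (r + 1)) :
    (PySem.Set.add s arr[l]).Nodup ∧
    (∀ x, x ∈ PySem.Set.add s arr[l] ↔ x ∈ pvWin arr l (r + 1)) ∧
    (PySem.Set.add s arr[l]).length = pvDC arr l (r + 1) := by
  have hln : l < arr.length := lt_of_le_of_lt hl hr
  have hwin : pvWin arr l (r + 1) = arr[l] :: pvWin arr (l + 1) (r + 1) :=
    pvWin_cons arr (by omega) hln
  have hnd' : (PySem.Set.add s arr[l]).Nodup := PySem.Set.nodup_add s arr[l] hnd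
  have hmem' : ∀ x, x ∈ PySem.Set.add s arr[l] ↔ x ∈ pvWin arr l (r + 1) := by
    intro x
    rw [PySem.Set.mem_add, hwin, List.mem_cons, hmem x]
    tauto
  exact ⟨hnd', hmem', pvSetLen _ _ hnd' hmem'⟩

lemma pvTake_rev (arr : List Int) (l : Nat) (hl : l < arr.length) :
    (arr.take (l + 1)).reverse = arr[l] :: (arr.take l).reverse := by
  rw [List.take_add_one, List.getElem?_eq_getElem hl]
  simp

-- B's inner scan computes exactly the descending search pvFindL
lemma pvScanB_spec (arr : List Int) (k : Int) (r : Nat) (hr : r < arr.length) :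
    ∀ l : Nat, l ≤ r → ∀ s : PySem.Set Int, s.Nodup →
      (∀ x : Int, x ∈ s ↔ x ∈ pvWin arr (l + 1) (r + 1)) →
      pvScanB k (r : Int) (arr.take (l + 1)).reverse ((r : Int) - l) s
        = (pvFindL arr k (r + 1) l).map (fun ls : Nat => ((r : Int) + 1 - (ls : Int), (ls : Int), (r : Int))) := by
  intro l
  induction l with
  | zero =>
    intro _ s hnd hmem
    have h0 : 0 < arr.length := by omega
    rw [pvTake_rev arr 0 h0]
    simp only [pvScanB, List.take_zero, List.reverse_nil]
    obtain ⟨hnd', hmem', hlen⟩ := pvScan_step arr r 0 (by omega) hr s hnd hmem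
    by_cases hg : ((pvDC arr 0 (r + 1) : Nat) : Int) = k
    · rw [if_pos (by rw [hlen]; exact hg)]
      simp only [pvFindL, if_pos hg, Option.map]
      simp only [Option.some.injEq, Prod.mk.injEq]
      exact ⟨by push_cast; ring, by push_cast; ring, trivial⟩
    · rw [if_neg (by rw [hlen]; exact hg)]
      simp only [pvFindL, if_neg hg, Option.map]
  | succ l ihl =>
    intro hlr s hnd hmem
    have hln : l + 1 < arr.length := by omega
    rw [pvTake_rev arr (l + 1) hln]
    simp only [pvScanB]
    obtain ⟨hnd', hmem', hlen⟩ := pvScan_step arr r (l + 1) hlr hr s hnd hmem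
    by_cases hg : ((pvDC arr (l + 1) (r + 1) : Nat) : Int) = k
    · rw [if_pos (by rw [hlen]; exact hg)]
      simp only [pvFindL, if_pos hg, Option.map]
      simp only [Option.some.injEq, Prod.mk.injEq]
      exact ⟨by push_cast; ring, by push_cast; ring, trivial⟩
    · rw [if_neg (by rw [hlen]; exact hg)]
      simp only [pvFindL, if_neg hg]
      have hi : ((r : Int) - ((l + 1 : Nat) : Int) + 1) = (r : Int) - (l : Nat) := by
        push_cast; ring
      rw [hi]
      exact ihl (by omega) (PySem.Set.add s arr[l + 1]) hnd' hmem' 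

lemma pvStepB_rel (arr : List Int) (k : Int) {r : Nat} (hr : r < arr.length)
    {st : Option Int × Int × Int} {b : Option (Int × Int × Int)} (h : pvRel st b) :
    pvRel (pvUpd st r (pvCand arr k r)) (pvStepB arr k b (r : Int)) := by
  have hslice : (PySem.List.slice arr none (some ((r : Int) + 1))).reverse
      = (arr.take (r + 1)).reverse := by
    rw [show ((r : Int) + 1) = (((r + 1 : Nat)) : Int) from by push_cast; ring]
    rw [PySem.List.slice_to_natCast]
  have hmem0 : ∀ x : Int, x ∈ (PySem.Set.empty : PySem.Set Int) ↔ x ∈ pvWin arr (r + 1) (r + 1) := by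
    intro x
    rw [pvWin_eq_nil arr (le_refl _)]
    simp [PySem.Set.empty]
  have hscan := pvScanB_spec arr k r hr r (le_refl r) PySem.Set.empty (by simp [PySem.Set.empty]) hmem0
  rw [show ((r : Int) - (r : Int)) = (0 : Int) from by ring] at hscan
  unfold pvStepB
  rw [hslice, hscan]
  unfold pvCand
  cases hfl : pvFindL arr k (r + 1) r with
  | none =>
    simp only [Option.map]
    exact h
  | some l =>
    simp only [Option.map]
    rcases h with ⟨h1, h2⟩ | ⟨m, h1, h2⟩
    · rw [h2]
      simp only [pvUpd]
      rw [if_pos (by rw [h1]; rfl)]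
      right
      exact ⟨(r : Int) + 1 - (l : Int), rfl, rfl⟩
    · rw [h2]
      simp only [pvUpd, pvLtInf, h1]
      by_cases hc : (r : Int) + 1 - (l : Int) < m
      · rw [if_pos (by simpa using hc), if_pos (by simpa using hc)]
        right
        exact ⟨(r : Int) + 1 - (l : Int), rfl, rfl⟩
      · rw [if_neg (by simpa using hc), if_neg (by simpa using hc)]
        right
        exact ⟨m, h1, rfl⟩

lemma pvFoldB (arr : List Int) (k : Int) :
    ∀ R : Nat, R ≤ arr.length →
      pvRel (pvBest arr k R) ((PySem.List.pyRange 0 (R : Int) 1).foldl (pvStepB arr k) none) := by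
  intro R
  induction R with
  | zero =>
    intro _
    rw [show ((0 : Nat) : Int) = 0 from rfl, PySem.List.pyRange_one_eq_nil (by omega)]
    left
    exact ⟨rfl, rfl⟩
  | succ R ih =>
    intro hR
    have hsplit : PySem.List.pyRange 0 (((R + 1 : Nat)) : Int) 1
        = PySem.List.pyRange 0 ((R : Nat) : Int) 1 ++ [((R : Nat) : Int)] := by
      push_cast
      exact PySem.List.pyRange_one_succ_right (by omega)
    rw [hsplit, List.foldl_append]
    simp only [List.foldl]
    rw [pvBest_succ]
    exact pvStepB_rel arr k (by omega) (ih (by omega))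

-- k ≤ 0: A's while loop never runs, B's scan never fires
lemma pvScanB_none (k : Int) (hk : k ≤ 0) (r : Int) :
    ∀ (ys : List Int) (i : Int) (s : PySem.Set Int), pvScanB k r ys i s = none := by
  intro ys
  induction ys with
  | nil => intro i s; rfl
  | cons x rest ih =>
    intro i s
    simp only [pvScanB]
    have hx : x ∈ PySem.Set.add s x := by
      rw [PySem.Set.mem_add]; right; rfl
    have hpos : 0 < (PySem.Set.add s x).length := List.length_pos_of_mem hx
    rw [if_neg (by omega)]
    exact ih (i + 1) (PySem.Set.add s x)

lemma pvFoldA_nonpos (arr : List Int) (k : Int) (hk : k ≤ 0) :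
    ∀ R : Nat, R ≤ arr.length →
      ∃ d : PySem.Dict Int Int, ((PySem.List.pyRange 0 (R : Int) 1).foldl (pvStepA arr k)
        (PySem.Dict.empty, 0, 0, none, 0, 0)) = (d, 0, (pvDC arr 0 R : Int), none, 0, 0) ∧
        (∀ x : Int, d.getD x 0 = ((pvWin arr 0 R).count x : Int)) := by
  intro R
  induction R with
  | zero =>
    intro _
    rw [show ((0 : Nat) : Int) = 0 from rfl, PySem.List.pyRange_one_eq_nil (by omega)]
    refine ⟨PySem.Dict.empty, ?_, ?_⟩
    · unfold pvDC
      rw [pvWin_eq_nil arr (le_refl 0)]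
      simp
    · intro x
      rw [pvWin_eq_nil arr (le_refl 0)]
      simp [PySem.Dict.getD_empty]
  | succ R ih =>
    intro hR
    have hsplit : PySem.List.pyRange 0 (((R + 1 : Nat)) : Int) 1
        = PySem.List.pyRange 0 ((R : Nat) : Int) 1 ++ [((R : Nat) : Int)] := by
      push_cast
      exact PySem.List.pyRange_one_succ_right (by omega)
    rw [hsplit, List.foldl_append]
    obtain ⟨d, hfold, hcnt⟩ := ih (by omega)
    rw [hfold]
    simp only [List.foldl]
    have hRlen : R < arr.length := by omega
    have hxget : (PySem.List.pyGet? arr ((R : Nat) : Int)).getD 0 = arr[R] := by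
      simp [pysem, List.getElem?_eq_getElem hRlen]
    have hwin : pvWin arr 0 (R + 1) = pvWin arr 0 R ++ [arr[R]] := pvWin_append arr (by omega) hRlen
    have hdcapp := pvDC_append arr (l := 0) (by omega) hRlen
    have hcnt' : ∀ y : Int, (d.insert arr[R] (d.getD arr[R] 0 + 1)).getD y 0
        = ((pvWin arr 0 (R + 1)).count y : Int) := by
      intro y
      rw [PySem.Dict.getD_insert, hwin]
      push_cast [List.count_append, List.count_singleton']
      by_cases hy : y = arr[R]
      · simp [hy, hcnt]
      · have hy2 : ¬arr[R] = y := fun hc => hy hc.symm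
        simp [hy, hy2, hcnt]
    have hcurr' : (if d.getD arr[R] 0 = 0 then ((pvDC arr 0 R : Nat) : Int) + 1 else ((pvDC arr 0 R : Nat) : Int))
        = ((pvDC arr 0 (R + 1) : Nat) : Int) := by
      rw [hcnt arr[R], hdcapp]
      by_cases hmem : arr[R] ∈ pvWin arr 0 R
      · have hcz : (pvWin arr 0 R).count arr[R] ≠ 0 := by
          simp [List.count_eq_zero]; exact hmem
        rw [if_neg (by omega), if_pos hmem]
        push_cast; omega
      · have hcz : (pvWin arr 0 R).count arr[R] = 0 := by
          simp [List.count_eq_zero, hmem]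
        rw [hcz, if_pos (by omega), if_neg hmem]
        push_cast; omega
    have hdcpos : 0 < pvDC arr 0 (R + 1) := by
      unfold pvDC
      apply Finset.card_pos.mpr
      exact ⟨arr[R], by rw [List.mem_toFinset, hwin]; simp⟩
    unfold pvStepA
    simp only
    rw [hxget, hcurr']
    have hfuelpat : (((R : Nat) : Int) - 0 + 1).toNat + 1 = ((((R : Nat) : Int) - 0 + 1).toNat) + 1 := rfl
    refine ⟨d.insert arr[R] (d.getD arr[R] 0 + 1), ?_, hcnt'⟩
    simp only [pvWhileA]
    rw [if_neg (by omega)]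

-- ===== VERDICT (by name: the statement is the Claim_ definition above) =====
theorem smallestSubarrayWithKDistinct_spec : Claim_equal_smallestSubarrayWithKDistinct := by
  intro arr k _
  unfold Spec_smallestSubarrayWithKDistinct
  unfold smallestSubarrayWithKDistinct smallestSubarrayWithKDistinct_alt
  by_cases hg : k > (arr.length : Int) ∨ (arr.length : Int) = 0
  · rw [if_pos hg, if_pos hg]
  · rw [if_neg hg, if_neg hg]
    by_cases hk : 1 ≤ k
    · have hinv := pvFoldA arr k hk arr.length (le_refl _)
      have hrel := pvFoldB arr k arr.length (le_refl _)
      set stA := (PySem.List.pyRange 0 ((arr.length : Nat) : Int) 1).foldl (pvStepA arr k)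
        (PySem.Dict.empty, 0, 0, none, 0, 0) with hstA
      set stB := (PySem.List.pyRange 0 ((arr.length : Nat) : Int) 1).foldl (pvStepB arr k) none with hstB
      obtain ⟨d, left, curr, ml, mL, mR⟩ := stA
      obtain ⟨lN, _, _, _, _, _, _, hbest, _⟩ := hinv
      rw [← hbest] at hrel
      rcases hrel with ⟨h1, h2⟩ | ⟨m, h1, h2⟩
      · simp only at h1 h2
        rw [h2]
        simp [h1]
      · simp only at h1 h2
        rw [h2]
        simp [h1]
    · have hknp : k ≤ 0 := by omega
      obtain ⟨d, hfold, _⟩ := pvFoldA_nonpos arr k hknp arr.length (le_refl _)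
      rw [hfold]
      have hBnone : (PySem.List.pyRange 0 ((arr.length : Nat) : Int) 1).foldl (pvStepB arr k) none
          = (none : Option (Int × Int × Int)) := by
        rw [PySem.List.foldl_congr_mem _ (pvStepB arr k) (fun acc _ => acc) none
          (by
            intro acc x _
            unfold pvStepB
            rw [pvScanB_none k hknp])]
        exact PySem.List.foldl_ignore _ _
      rw [hBnone]
      simp
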